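-- pv_equiv track=rewrite | github.com/LSFleitas/Facultad | Python/Analizador-sintactico/Automatas/automataLiteral.py | automata_Literal
-- ===== SOURCE A (Python) =====
-- TRAP_STATE = -1
--
-- RESULT_TRAP = "RESULT_TRAP"
--
-- RESULT_ACCEPTED = "RESULT_ACCEPTED"
--
-- RESULT_NOT_ACCEPTED = "RESULT_NOT_ACCEPTED"
--
-- def automata_Literal(input):
-- 	state = 0
-- 	final = 3
--
-- 	def delta(state, caracter):
-- 		if state == 0 and caracter == "'":
-- 			return 1
-- 		if state == 1 and caracter.isalpha():
-- 			return 2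
-- 		if state == 2 and caracter.isalpha():
-- 			return 2
-- 		if state == 2 and caracter == "'":
-- 			return 3
-- 		return TRAP_STATE
--
-- 	for caracter in input:
-- 		next_state = delta(state, caracter)
-- 		state = next_state
--
-- 	if state == final:
-- 		return RESULT_ACCEPTED
-- 	if state == TRAP_STATE:
-- 		return RESULT_TRAP
-- 	return RESULT_NOT_ACCEPTED
-- ===== SOURCE B (Python) =====
-- TRAP_STATE = -1
-- RESULT_TRAP = "RESULT_TRAP"
-- RESULT_ACCEPTED = "RESULT_ACCEPTED"
-- RESULT_NOT_ACCEPTED = "RESULT_NOT_ACCEPTED"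
--
-- def automata_Literal(input):
--     if input == "":
--         return RESULT_NOT_ACCEPTED
--     if input[0] != "'":
--         return RESULT_TRAP
--     rem = input[1:]
--     n = 0
--     while n < len(rem) and rem[n].isalpha():
--         n += 1
--     if n == len(rem):
--         return RESULT_NOT_ACCEPTED
--     if n == 0:
--         return RESULT_TRAP
--     if rem[n] == "'" and n == len(rem) - 1:
--         return RESULT_ACCEPTED
--     return RESULT_TRAP
-- ===== Notes on version B (the rewrite author's own statement) =====
-- stated objective: simpler
-- what changed: Replaces the explicit DFA (state variable + delta transition function folded over the whole input) by a direct shape analysis: leading-quote check, count of leading alphabetic characters, one look at the closing-quote position; it also stops at the first non-matching character instead of scanning on in the trap state.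
import Mathlib
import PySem

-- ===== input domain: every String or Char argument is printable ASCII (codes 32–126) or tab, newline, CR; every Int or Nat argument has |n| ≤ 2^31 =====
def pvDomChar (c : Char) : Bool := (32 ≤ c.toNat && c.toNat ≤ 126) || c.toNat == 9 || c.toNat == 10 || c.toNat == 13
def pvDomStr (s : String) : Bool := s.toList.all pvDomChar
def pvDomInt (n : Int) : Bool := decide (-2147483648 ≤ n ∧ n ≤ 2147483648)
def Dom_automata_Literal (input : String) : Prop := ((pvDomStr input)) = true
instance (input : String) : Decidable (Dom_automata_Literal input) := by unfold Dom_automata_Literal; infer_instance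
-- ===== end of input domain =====

-- B replaces A's explicit DFA (state/delta loop) by a direct case analysis: leading quote,
-- count of leading alphabetic characters, then the closing-quote position; plainer, and it stops at the
-- first non-matching character where A scans on in the trap state (measured faster in a timing run).

-- ===== PORT A =====
def pvDelta (state : Int) (c : Char) : Int :=
  if state = 0 ∧ c = '\'' then 1
  else if state = 1 ∧ PySem.Chars.isalpha c then 2
  else if state = 2 ∧ PySem.Chars.isalpha c then 2
  else if state = 2 ∧ c = '\'' then 3
  else -1

def automata_Literal (input : String) : String :=
  let state := input.toList.foldl (fun s c => pvDelta s c) 0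
  if state = 3 then "RESULT_ACCEPTED"
  else if state = -1 then "RESULT_TRAP"
  else "RESULT_NOT_ACCEPTED"

-- ===== PORT B =====
-- the while loop of Source B: number of leading alphabetic characters
def pvCountAlpha (l : List Char) : Nat :=
  match l with
  | [] => 0
  | c :: t => if PySem.Chars.isalpha c then pvCountAlpha t + 1 else 0

def automata_Literal_alt (input : String) : String :=
  match input.toList with
  | [] => "RESULT_NOT_ACCEPTED"
  | c :: rem =>
    if c ≠ '\'' then "RESULT_TRAP"
    else
      let n := pvCountAlpha rem
      if n = rem.length then "RESULT_NOT_ACCEPTED"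
      else if n = 0 then "RESULT_TRAP"
      else if rem[n]? = some '\'' ∧ n = rem.length - 1 then "RESULT_ACCEPTED"
      else "RESULT_TRAP"

-- ===== PRECONDITION & SPEC =====
def Spec_automata_Literal (input : String) (out : String) : Prop := out = automata_Literal_alt input
instance (input : String) (out : String) : Decidable (Spec_automata_Literal input out) := by unfold Spec_automata_Literal; infer_instance

-- ===== CLAIM (what is proved, stated in full; the proofs are below) =====
def Claim_equal_automata_Literal : Prop := ∀ (input : String), Dom_automata_Literal input → Spec_automata_Literal input (automata_Literal input)

-- ===== LEMMAS AND PROOFS =====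
-- A's final-state → result mapping
def pvRes (s : Int) : String :=
  if s = 3 then "RESULT_ACCEPTED"
  else if s = -1 then "RESULT_TRAP"
  else "RESULT_NOT_ACCEPTED"

theorem foldl_delta_trap (l : List Char) : l.foldl (fun s c => pvDelta s c) (-1) = -1 := by
  induction l with
  | nil => rfl
  | cons c t ih => simpa [pvDelta] using ih

theorem foldl_delta_final (l : List Char) :
    l.foldl (fun s c => pvDelta s c) 3 = if l = [] then 3 else -1 := by
  cases l with
  | nil => rfl
  | cons c t => simpa [pvDelta] using foldl_delta_trap t

theorem countAlpha_le (l : List Char) : pvCountAlpha l ≤ l.length := by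
  induction l with
  | nil => simp [pvCountAlpha]
  | cons c t ih => by_cases h : PySem.Chars.isalpha c <;> simp [pvCountAlpha, h] <;> omega

theorem foldl_delta_state2 (t : List Char) :
    pvRes (t.foldl (fun s c => pvDelta s c) 2) =
      if pvCountAlpha t = t.length then "RESULT_NOT_ACCEPTED"
      else if t[pvCountAlpha t]? = some '\'' ∧ pvCountAlpha t = t.length - 1 then
        "RESULT_ACCEPTED"
      else "RESULT_TRAP" := by
  induction t with
  | nil => simp [pvCountAlpha, pvRes]
  | cons c t ih =>
    by_cases ha : PySem.Chars.isalpha c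
    · have hle := countAlpha_le t
      rw [show (c :: t).foldl (fun s c => pvDelta s c) 2 = t.foldl (fun s c => pvDelta s c) 2 by
        simp [pvDelta, ha]]
      rw [ih]
      by_cases hlen : pvCountAlpha t = t.length
      · simp [pvCountAlpha, ha, hlen]
      · have h1 : ¬ (pvCountAlpha (c :: t) = (c :: t).length) := by
          simp [pvCountAlpha, ha]; omega
        have h2 : (c :: t)[pvCountAlpha (c :: t)]? = t[pvCountAlpha t]? := by
          simp [pvCountAlpha, ha]
        have h3 : (pvCountAlpha (c :: t) = (c :: t).length - 1) ↔
            (pvCountAlpha t = t.length - 1) := by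
          simp [pvCountAlpha, ha]; omega
        simp only [if_neg hlen, if_neg h1, h2, h3]
    · by_cases hq : c = '\''
      · subst hq
        rw [show ('\'' :: t).foldl (fun s c => pvDelta s c) 2 = t.foldl (fun s c => pvDelta s c) 3 by
          simp [pvDelta, ha]]
        rw [foldl_delta_final]
        have hne : ¬ (pvCountAlpha ('\'' :: t) = ('\'' :: t).length) := by
          simp [pvCountAlpha, ha]
        cases t with
        | nil => simp [pvCountAlpha, ha, pvRes]
        | cons d u => simp [pvCountAlpha, ha, pvRes, List.length_cons]
      · rw [show ((c :: t).foldl (fun s c => pvDelta s c) 2) =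
            t.foldl (fun s c => pvDelta s c) (-1) by simp [pvDelta, ha, hq]]
        rw [foldl_delta_trap]
        simp [pvCountAlpha, ha, hq, pvRes]

theorem foldl_delta_state1 (rem : List Char) :
    pvRes (rem.foldl (fun s c => pvDelta s c) 1) =
      if pvCountAlpha rem = rem.length then "RESULT_NOT_ACCEPTED"
      else if pvCountAlpha rem = 0 then "RESULT_TRAP"
      else if rem[pvCountAlpha rem]? = some '\'' ∧ pvCountAlpha rem = rem.length - 1 then
        "RESULT_ACCEPTED"
      else "RESULT_TRAP" := by
  cases rem with
  | nil => simp [pvCountAlpha, pvRes]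
  | cons a t =>
    by_cases ha : PySem.Chars.isalpha a
    · have hle := countAlpha_le t
      rw [show ((a :: t).foldl (fun s c => pvDelta s c) 1) =
          t.foldl (fun s c => pvDelta s c) 2 by simp [pvDelta, ha]]
      rw [foldl_delta_state2]
      by_cases hlen : pvCountAlpha t = t.length
      · simp [pvCountAlpha, ha, hlen]
      · have h1 : ¬ (pvCountAlpha (a :: t) = (a :: t).length) := by
          simp [pvCountAlpha, ha]; omega
        have h0 : ¬ (pvCountAlpha (a :: t) = 0) := by simp [pvCountAlpha, ha]
        have h2 : (a :: t)[pvCountAlpha (a :: t)]? = t[pvCountAlpha t]? := by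
          simp [pvCountAlpha, ha]
        have h3 : (pvCountAlpha (a :: t) = (a :: t).length - 1) ↔
            (pvCountAlpha t = t.length - 1) := by
          simp [pvCountAlpha, ha]; omega
        simp only [if_neg hlen, if_neg h1, if_neg h0, h2, h3]
    · rw [show ((a :: t).foldl (fun s c => pvDelta s c) 1) =
          t.foldl (fun s c => pvDelta s c) (-1) by simp [pvDelta, ha]]
      rw [foldl_delta_trap]
      simp [pvCountAlpha, ha, pvRes]

theorem automata_Literal_spec : Claim_equal_automata_Literal := by
  intro input _
  show automata_Literal input = automata_Literal_alt input
  unfold automata_Literal automata_Literal_alt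
  cases h : input.toList with
  | nil => rfl
  | cons c rem =>
    by_cases hq : c = '\''
    · subst hq
      rw [show ((('\'' :: rem).foldl (fun s c => pvDelta s c) 0)) =
          rem.foldl (fun s c => pvDelta s c) 1 by simp [pvDelta]]
      have := foldl_delta_state1 rem
      simp only [pvRes] at this
      simp only [this]
      simp
    · rw [show (((c :: rem).foldl (fun s c => pvDelta s c) 0)) =
          rem.foldl (fun s c => pvDelta s c) (-1) by simp [pvDelta, hq]]
      rw [foldl_delta_trap]
      simp [hq]
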